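-- pv_equiv track=rewrite | github.com/Pshemas/SSG_BD | src/markdown_blocks.py | is_unordered_list
-- ===== SOURCE A (Python) =====
-- def is_unordered_list(markdown_text: str) -> bool:
--     # TODO: simplify with startswith, keeping option to start with number greater than 1
--     segments = markdown_text.split("\n")
--     first_before_dot = []
--     for segment in segments:
--         first_before_dot.append(segment.split(". ", maxsplit=1)[0])
--     try:
--         convereted_firsts = [int(x) for x in first_before_dot if x]
--         if len(convereted_firsts) == 1:
--             return True
--     except:
--         return False
--     idx = 0
--     for number in convereted_firsts[1:]:
--         if number != convereted_firsts[idx] + 1: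
--             return False
--         idx += 1
--     return True
-- ===== SOURCE B (Python) =====
-- def is_unordered_list(markdown_text: str) -> bool:
--     # Single streaming pass: track the expected next number; no intermediate lists.
--     expected = None
--     for line in markdown_text.split("\n"):
--         token = line.split(". ", 1)[0]
--         if not token:
--             continue
--         try:
--             n = int(token)
--         except ValueError:
--             return False
--         if expected is not None and n != expected:
--             return False
--         expected = n + 1
--     return True
-- ===== Notes on version B (the rewrite author's own statement) =====
-- stated objective: simpler
-- what changed: B replaces A's three staged passes (collect all tokens, convert all to ints inside one try, then a pairwise idx-loop over the int list) with a single streaming pass over the lines that keeps one piece of state (the expected next number) and exits early at the first unparsable or non-consecutive line, building no intermediate lists.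
import Mathlib
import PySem

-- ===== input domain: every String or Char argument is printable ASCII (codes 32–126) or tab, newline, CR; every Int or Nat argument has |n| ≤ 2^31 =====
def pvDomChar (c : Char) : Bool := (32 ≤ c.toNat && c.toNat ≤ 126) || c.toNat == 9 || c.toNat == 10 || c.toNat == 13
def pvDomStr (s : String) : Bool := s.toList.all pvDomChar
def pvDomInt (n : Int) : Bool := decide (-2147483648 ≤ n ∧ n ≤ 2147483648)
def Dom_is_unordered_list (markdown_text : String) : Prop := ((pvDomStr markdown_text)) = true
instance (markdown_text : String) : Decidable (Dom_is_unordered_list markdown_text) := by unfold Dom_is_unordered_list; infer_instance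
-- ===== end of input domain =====

-- B replaces A's staged passes (collect tokens, convert all, pairwise idx-loop)
-- with a single streaming pass keeping the expected next number (objective: simpler).

-- ===== PORT A =====
-- segment.split(". ", maxsplit=1)[0]  (split with a non-empty separator always yields a non-empty list, so [0] never raises)
def pvFirstTok (seg : String) : String :=
  ((PySem.Str.splitMax? seg ". " 1).getD []).headD ""

-- [int(x) for x in tokens if x]; none = some int() raised ValueError
def pvConv : List String → Option (List Int)
  | [] => some []
  | t :: rest =>
    if t = "" then pvConv rest
    else
      match PySem.Int.ofStr? t, pvConv rest with
      | some n, some ns => some (n :: ns)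
      | _, _ => none

-- the 'for number in convereted_firsts[1:]' loop with its idx counter (idx stays in range, so getD is Python's cs[idx])
def pvLoopA (cs : List Int) : List Int → Nat → Bool
  | [], _ => true
  | n :: rest, idx =>
    if n ≠ cs.getD idx 0 + 1 then false else pvLoopA cs rest (idx + 1)

def is_unordered_list (markdown_text : String) : Bool :=
  let segments := (PySem.Str.split? markdown_text "\n").getD []
  let first_before_dot := segments.map pvFirstTok
  match pvConv first_before_dot with
  | none => false
  | some convereted_firsts =>
    if convereted_firsts.length = 1 then true
    else pvLoopA convereted_firsts (convereted_firsts.drop 1) 0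

-- ===== PORT B =====
-- the streaming loop: state 'expected' is Python's expected (None before the first number)
def pvLoopB : List String → Option Int → Bool
  | [], _ => true
  | line :: rest, expected =>
    let token := ((PySem.Str.splitMax? line ". " 1).getD []).headD ""
    if token = "" then pvLoopB rest expected
    else
      match PySem.Int.ofStr? token with
      | none => false
      | some n =>
        match expected with
        | some e => if n ≠ e then false else pvLoopB rest (some (n + 1))
        | none => pvLoopB rest (some (n + 1))

def is_unordered_list_alt (markdown_text : String) : Bool :=
  pvLoopB ((PySem.Str.split? markdown_text "\n").getD []) none

-- ===== PRECONDITION & SPEC =====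
def Spec_is_unordered_list (markdown_text : String) (out : Bool) : Prop := out = is_unordered_list_alt markdown_text
instance (markdown_text : String) (out : Bool) : Decidable (Spec_is_unordered_list markdown_text out) := by unfold Spec_is_unordered_list; infer_instance

-- ===== CLAIM (what is proved, stated in full; the proofs are below) =====
def Claim_equal_is_unordered_list : Prop := ∀ (markdown_text : String), Dom_is_unordered_list markdown_text → Spec_is_unordered_list markdown_text (is_unordered_list markdown_text)

-- ===== LEMMAS AND PROOFS =====

-- what B's streaming state checks on an already-converted list of ints
def pvChainCheck : List Int → Option Int → Bool
  | [], _ => true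
  | n :: rest, some e => if n ≠ e then false else pvChainCheck rest (some (n + 1))
  | n :: rest, none => pvChainCheck rest (some (n + 1))

-- B's streaming loop = (conversion succeeds) ∧ (consecutiveness check on the converted list)
lemma pvLoopB_eq_conv : ∀ (ts : List String) (expected : Option Int),
    pvLoopB ts expected =
      (match pvConv (ts.map pvFirstTok) with
       | none => false
       | some ns => pvChainCheck ns expected) := by
  intro ts
  induction ts with
  | nil => intro expected; rfl
  | cons line rest ih =>
    intro expected
    show (if pvFirstTok line = "" then pvLoopB rest expected
          else match PySem.Int.ofStr? (pvFirstTok line) with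
            | none => false
            | some n =>
              match expected with
              | some e => if n ≠ e then false else pvLoopB rest (some (n + 1))
              | none => pvLoopB rest (some (n + 1))) = _
    simp only [List.map_cons, pvConv]
    by_cases h0 : pvFirstTok line = ""
    · rw [if_pos h0, if_pos h0, ih]
    · rw [if_neg h0, if_neg h0]
      cases hn : PySem.Int.ofStr? (pvFirstTok line) with
      | none => cases pvConv (rest.map pvFirstTok) <;> rfl
      | some n =>
        cases hc : pvConv (rest.map pvFirstTok) with
        | none =>
          cases expected with
          | none => dsimp only; rw [ih, hc]
          | some e =>
            dsimp only
            by_cases hne : n = e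
            · rw [if_neg (by simp [hne]), ih, hc]
            · rw [if_pos (by simpa using hne)]
        | some ns =>
          cases expected with
          | none => dsimp only; rw [ih, hc]; simp [pvChainCheck]
          | some e =>
            dsimp only
            by_cases hne : n = e
            · rw [if_neg (by simp [hne]), ih, hc]; simp [pvChainCheck, hne]
            · rw [if_pos (by simpa using hne)]; simp [pvChainCheck, hne]

-- pvChainCheck with state (some (a+1)) checks that a :: t is a +1-chain
lemma pvChainCheck_chain : ∀ (t : List Int) (a : Int),
    pvChainCheck t (some (a + 1)) = true ↔ List.IsChain (fun x y => y = x + 1) (a :: t) := by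
  intro t
  induction t with
  | nil => intro a; simp [pvChainCheck]
  | cons b rest ih =>
    intro a
    show (if b ≠ a + 1 then false else pvChainCheck rest (some (b + 1))) = true ↔ _
    rw [List.isChain_cons_cons]
    by_cases hb : b = a + 1
    · rw [if_neg (by simp [hb]), ih b]; simp [hb]
    · rw [if_pos (by simpa using hb)]; simp [hb]

-- A's loop, seen from position idx with previous element prev, checks that the rest is a +1-chain
lemma pvLoopA_eq_chain (cs : List Int) :
    ∀ (l : List Int) (prev : Int) (idx : Nat), cs.drop idx = prev :: l →
      (pvLoopA cs l idx = true ↔ List.IsChain (fun x y => y = x + 1) (prev :: l)) := by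
  intro l
  induction l with
  | nil => intro prev idx _; simp [pvLoopA]
  | cons n rest ih =>
    intro prev idx hdrop
    have hget : cs.getD idx 0 = prev := by
      have h1 : cs[idx]? = some prev := by
        rw [← List.head?_drop, hdrop]; rfl
      simp [List.getD_eq_getElem?_getD, h1]
    have hdrop' : cs.drop (idx + 1) = n :: rest := by
      rw [← List.tail_drop, hdrop]; rfl
    rw [show pvLoopA cs (n :: rest) idx
        = (if n ≠ cs.getD idx 0 + 1 then false else pvLoopA cs rest (idx + 1)) from rfl, hget]
    by_cases hne : n = prev + 1
    · rw [if_neg (by simp [hne])]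
      rw [List.isChain_cons_cons]
      rw [ih n (idx + 1) hdrop']
      simp [hne]
    · rw [if_pos (by simpa using hne)]
      simp only [Bool.false_eq_true, false_iff]
      intro h
      exact hne (List.isChain_cons_cons.mp h).1

-- ===== VERDICT (by name: the statement is the Claim_ definition above) =====
theorem is_unordered_list_spec : Claim_equal_is_unordered_list := by
  intro markdown_text _
  unfold Spec_is_unordered_list is_unordered_list is_unordered_list_alt
  rw [pvLoopB_eq_conv]
  simp only []
  cases hconv : pvConv (((PySem.Str.split? markdown_text "\n").getD []).map pvFirstTok) with
  | none => rfl
  | some cs =>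
    match cs with
    | [] => rfl
    | [a] => rfl
    | a :: b :: t =>
      show (if (a :: b :: t : List Int).length = 1 then true
              else pvLoopA (a :: b :: t) ((a :: b :: t).drop 1) 0)
          = pvChainCheck (a :: b :: t) none
      rw [if_neg (by simp)]
      show pvLoopA (a :: b :: t) (b :: t) 0 = pvChainCheck (b :: t) (some (a + 1))
      rw [Bool.eq_iff_iff,
        pvLoopA_eq_chain (a :: b :: t) (b :: t) a 0 rfl,
        pvChainCheck_chain (b :: t) a]
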